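-- pv_equiv track=rewrite | github.com/ddoddii/algorithm | python/Problems/onboarding_in_python/#6.py | solution
-- ===== SOURCE A (Python) =====
-- def solution(forms):
--     names = [form[1] for form in forms]
--     emails = [form[0] for form in forms]
--
--     duplicate_count = count_duplicate_letters(names)
--
--     duplicate_substrings = []
--     for substring, count in duplicate_count.items():
--         if count > 1:
--             duplicate_substrings.append(substring)
--
--     duplicate_emails = set()
--     for substring in duplicate_substrings:
--         duplicate_emails_list = [email for name, email in zip(names, emails) if substring in name]
--         duplicate_emails.update(duplicate_emails_list)
--
--     all_duplicate_emails_list = list(duplicate_emails)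
--     sorted_emails = sorted(all_duplicate_emails_list)
--
--     return (sorted_emails)
--
-- def count_duplicate_letters(names):
--
--     duplicate_count = {}
--
--     for name in names:
--         for i in range(len(name)-1):
--             substring = name[i:i+2]
--             if substring not in duplicate_count:
--                 duplicate_count[substring] = 1
--             else:
--                 duplicate_count[substring] += 1
--     return duplicate_count
-- ===== SOURCE B (Python) =====
-- def solution(forms):
--     counts = {}
--     for _, name in forms:
--         for i in range(len(name) - 1):
--             g = name[i:i+2]
--             counts[g] = counts.get(g, 0) + 1
--     dup = set()
--     for email, name in forms:
--         if any(counts.get(name[i:i+2], 0) > 1 for i in range(len(name) - 1)):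
--             dup.add(email)
--     return sorted(dup)
-- ===== Notes on version B (the rewrite author's own statement) =====
-- stated objective: alternative
-- what changed: B builds the 2-gram count dict in one pass over the forms and then decides each email by checking its own name's 2-grams against the dict, removing A's loop over all duplicate substrings with an inner substring-search over every name per substring.
import Mathlib
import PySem

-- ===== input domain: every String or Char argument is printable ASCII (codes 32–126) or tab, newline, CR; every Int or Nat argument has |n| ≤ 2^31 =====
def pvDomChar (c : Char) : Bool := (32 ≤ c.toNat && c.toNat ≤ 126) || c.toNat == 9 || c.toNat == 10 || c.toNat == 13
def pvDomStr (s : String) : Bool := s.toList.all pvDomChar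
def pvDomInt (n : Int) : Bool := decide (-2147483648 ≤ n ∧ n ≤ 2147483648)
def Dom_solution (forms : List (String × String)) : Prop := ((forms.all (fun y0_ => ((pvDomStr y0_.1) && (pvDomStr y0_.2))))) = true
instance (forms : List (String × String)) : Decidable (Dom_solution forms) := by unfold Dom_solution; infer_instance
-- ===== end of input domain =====

-- B replaces A's per-duplicate-substring scan of all names by one dict pass and a per-form
-- check of its own name's 2-grams (objective: alternative; same return value).

-- ===== PORT A =====
def count_duplicate_letters (names : List String) : PySem.Dict String Int :=
  names.foldl (fun duplicate_count name =>
    (PySem.List.pyRange 0 ((name.toList.length : Int) - 1) 1).foldl (fun duplicate_count i =>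
      let substring := PySem.Str.slice name (some i) (some (i + 2))
      if duplicate_count.contains substring = false then
        duplicate_count.insert substring 1
      else
        duplicate_count.modify substring 0 (· + 1)) duplicate_count) PySem.Dict.empty

def solution (forms : List (String × String)) : List String :=
  let names := forms.map (fun form => form.2)
  let emails := forms.map (fun form => form.1)
  let duplicate_count := count_duplicate_letters names
  let duplicate_substrings := duplicate_count.items.foldl (fun acc p =>
    if p.2 > 1 then acc ++ [p.1] else acc) []
  let duplicate_emails := duplicate_substrings.foldl (fun s substring =>
    PySem.Set.update s
      (((names.zip emails).filter (fun p => PySem.Str.isIn substring p.1)).map (fun p => p.2)))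
    PySem.Set.empty
  PySem.List.sorted duplicate_emails (fun x => x) false

-- ===== PORT B =====
def solution_alt (forms : List (String × String)) : List String :=
  let counts := forms.foldl (fun counts form =>
    (PySem.List.pyRange 0 ((form.2.toList.length : Int) - 1) 1).foldl (fun counts i =>
      let g := PySem.Str.slice form.2 (some i) (some (i + 2))
      counts.insert g (counts.getD g 0 + 1)) counts)
    (PySem.Dict.empty : PySem.Dict String Int)
  let dup := forms.foldl (fun dup form =>
    if (PySem.List.pyRange 0 ((form.2.toList.length : Int) - 1) 1).any (fun i =>
        counts.getD (PySem.Str.slice form.2 (some i) (some (i + 2))) 0 > 1) then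
      PySem.Set.add dup form.1
    else dup) PySem.Set.empty
  PySem.List.sorted dup (fun x => x) false

-- ===== PRECONDITION & SPEC =====
def Spec_solution (forms : List (String × String)) (out : List String) : Prop := out = solution_alt forms
instance (forms : List (String × String)) (out : List String) : Decidable (Spec_solution forms out) := by unfold Spec_solution; infer_instance

-- ===== CLAIM (what is proved, stated in full; the proofs are below) =====
def Claim_equal_solution : Prop := ∀ (forms : List (String × String)), Dom_solution forms → Spec_solution forms (solution forms)

-- ===== LEMMAS AND PROOFS =====

-- the list of all 2-gram occurrences of one name, and of all names of the forms
def pvGrams (name : String) : List String :=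
  (PySem.List.pyRange 0 ((name.toList.length : Int) - 1) 1).map
    (fun i => PySem.Str.slice name (some i) (some (i + 2)))

def pvOcc (forms : List (String × String)) : List String :=
  forms.flatMap (fun form => pvGrams form.2)

-- A's per-gram dict step is exactly Counter's step
theorem pvStepA_eq (d : PySem.Dict String Int) (g : String) :
    (if d.contains g = false then d.insert g 1 else d.modify g 0 (· + 1))
      = d.modify g 0 (· + 1) := by
  by_cases h : d.contains g = false
  · simp [h, PySem.Dict.modify, PySem.Dict.getD_of_not_contains d 0 h]
  · simp [h]

theorem pvDictA (names : List String) :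
    count_duplicate_letters names = PySem.Dict.counter (names.flatMap pvGrams) := by
  rw [PySem.Dict.counter_eq_foldl, List.foldl_flatMap]
  unfold count_duplicate_letters pvGrams
  apply PySem.List.foldl_congr_mem
  intro acc name _
  rw [List.foldl_map]
  apply PySem.List.foldl_congr_mem
  intro d i _
  exact pvStepA_eq d _

theorem pvDictB (forms : List (String × String)) :
    forms.foldl (fun counts form =>
      (PySem.List.pyRange 0 ((form.2.toList.length : Int) - 1) 1).foldl (fun counts i =>
        counts.insert (PySem.Str.slice form.2 (some i) (some (i + 2)))
          ((counts.getD (PySem.Str.slice form.2 (some i) (some (i + 2))) 0) + 1)) counts)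
      PySem.Dict.empty
      = PySem.Dict.counter (pvOcc forms) := by
  rw [PySem.Dict.counter_eq_foldl]
  unfold pvOcc
  rw [List.foldl_flatMap]
  apply PySem.List.foldl_congr_mem
  intro acc form _
  unfold pvGrams
  rw [List.foldl_map]
  apply PySem.List.foldl_congr_mem
  intro d i _
  simp [PySem.Dict.modify]

-- every recorded 2-gram really is a take-2/drop-j slice of its name
theorem pvGrams_mem (n g : String) (hg : g ∈ pvGrams n) :
    ∃ j : Nat, j + 2 ≤ n.toList.length ∧ g.toList = (n.toList.drop j).take 2 := by
  unfold pvGrams at hg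
  simp only [List.mem_map, PySem.List.mem_pyRange_one] at hg
  obtain ⟨i, ⟨h0, h1⟩, rfl⟩ := hg
  refine ⟨i.toNat, by omega, ?_⟩
  rw [PySem.Str.toList_slice, PySem.Chars.slice_eq_listSlice]
  have hi : (i : Int) = ((i.toNat : Nat) : Int) := by omega
  have h2 : (2 : Int) = ((2 : Nat) : Int) := by norm_num
  rw [hi, h2, PySem.List.slice_natCast_add, Int.toNat_natCast]

theorem pvOcc_len (forms : List (String × String)) (g : String) (hg : g ∈ pvOcc forms) :
    g.toList.length = 2 := by
  unfold pvOcc at hg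
  simp only [List.mem_flatMap] at hg
  obtain ⟨f, _, hf⟩ := hg
  obtain ⟨j, hj, he⟩ := pvGrams_mem f.2 g hf
  rw [he, List.length_take, List.length_drop]
  omega

-- crux: "some globally-duplicate 2-gram occurs in name" = "some 2-gram of name is globally duplicate"
theorem pvCrux (forms : List (String × String)) (name : String) :
    (∃ g, 1 < (pvOcc forms).count g ∧ PySem.Str.isIn g name = true)
      ↔ (PySem.List.pyRange 0 ((name.toList.length : Int) - 1) 1).any (fun i =>
          decide (1 < (PySem.Dict.counter (pvOcc forms)).getD
            (PySem.Str.slice name (some i) (some (i + 2))) 0)) = true := by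
  constructor
  · rintro ⟨g, hc, hin⟩
    have hmem : g ∈ pvOcc forms := List.count_pos_iff.mp (by omega)
    have hlen := pvOcc_len forms g hmem
    rw [PySem.Str.isIn_iff_infix] at hin
    have hdrop : ∃ j, g.toList <+: name.toList.drop j := by
      rw [PySem.Chars.exists_prefix_drop_iff_isIn, PySem.Chars.isIn_iff_infix]
      exact hin
    obtain ⟨j, hpre⟩ := hdrop
    have hle := hpre.length_le
    rw [List.length_drop, hlen] at hle
    have hj2 : j + 2 ≤ name.toList.length := by omega
    rw [List.any_eq_true]
    refine ⟨(j : Int), ?_, ?_⟩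
    · rw [PySem.List.mem_pyRange_one]; omega
    · have hsl : PySem.Str.slice name (some (j : Int)) (some ((j : Int) + 2)) = g := by
        rw [← String.toList_inj, PySem.Str.toList_slice, PySem.Chars.slice_eq_listSlice]
        have h2 : (2 : Int) = ((2 : Nat) : Int) := by norm_num
        rw [h2, PySem.List.slice_natCast_add]
        have := List.prefix_iff_eq_take.mp hpre
        rw [hlen] at this
        exact this.symm
      rw [hsl, PySem.Dict.getD_counter]
      simpa using hc
  · intro h
    rw [List.any_eq_true] at h
    obtain ⟨i, hi, hd⟩ := h
    rw [PySem.List.mem_pyRange_one] at hi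
    simp only [PySem.Dict.getD_counter, decide_eq_true_eq] at hd
    refine ⟨PySem.Str.slice name (some i) (some (i + 2)), by exact_mod_cast hd, ?_⟩
    have hi' : (i : Int) = ((i.toNat : Nat) : Int) := by omega
    rw [PySem.Str.isIn_iff_infix, PySem.Str.toList_slice, PySem.Chars.slice_eq_listSlice]
    have h2 : (2 : Int) = ((2 : Nat) : Int) := by norm_num
    rw [hi', h2, PySem.List.slice_natCast_add]
    exact ((List.take_prefix _ _).isInfix).trans ((List.drop_suffix _ _).isInfix)

-- membership in a fold of set-updates
theorem pvMem_foldl_update {α β : Type} [BEq α] [LawfulBEq α] (l : List β) (g : β → List α)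
    (s : PySem.Set α) (y : α) :
    y ∈ l.foldl (fun s x => PySem.Set.update s (g x)) s ↔ y ∈ s ∨ ∃ x ∈ l, y ∈ g x := by
  induction l generalizing s with
  | nil => simp
  | cons b t ih =>
    simp only [List.foldl_cons, ih, PySem.Set.mem_update, List.mem_cons]
    constructor
    · rintro ((h | h) | ⟨x, hx, hy⟩)
      · exact Or.inl h
      · exact Or.inr ⟨b, Or.inl rfl, h⟩
      · exact Or.inr ⟨x, Or.inr hx, hy⟩
    · rintro (h | ⟨x, (rfl | hx), hy⟩)
      · exact Or.inl (Or.inl h)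
      · exact Or.inl (Or.inr hy)
      · exact Or.inr ⟨x, hx, hy⟩

theorem pvNodup_foldl_update {α β : Type} [BEq α] [LawfulBEq α] (l : List β) (g : β → List α)
    (s : PySem.Set α) (hs : s.Nodup) :
    (l.foldl (fun s x => PySem.Set.update s (g x)) s).Nodup := by
  induction l generalizing s with
  | nil => exact hs
  | cons b t ih => exact ih _ (PySem.Set.nodup_update _ _ hs)

theorem pvOcc_eq (forms : List (String × String)) :
    (forms.map (fun form => form.2)).flatMap pvGrams = pvOcc forms := by
  rw [List.flatMap_map]; rfl

theorem solution_spec : Claim_equal_solution := by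
  intro forms _
  show solution forms = solution_alt forms
  simp only [solution, solution_alt]
  simp only [pvDictA, pvOcc_eq]
  rw [pvDictB]
  rw [PySem.List.foldl_append_ite, PySem.Dict.items_counter,
      PySem.List.foldl_if_eq_foldl_filter, ← PySem.Set.update_map_eq_foldl_add]
  simp only [PySem.Set.empty, PySem.Set.update_nil_left, List.nil_append]
  apply PySem.List.sorted_eq_sorted_of_perm _ _ _ (fun a b h => h)
  rw [List.perm_ext_iff_of_nodup (pvNodup_foldl_update _ _ _ List.nodup_nil)
    (PySem.Set.nodup_ofList _)]
  intro e
  rw [pvMem_foldl_update]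
  simp only [List.not_mem_nil, false_or, List.mem_map, List.mem_filter,
    PySem.Set.mem_ofList, List.zip_map', Prod.exists, decide_eq_true_eq]
  constructor
  · rintro ⟨g, ⟨a, b, ⟨⟨g', hg'occ, heq⟩, hb⟩, rfl⟩, a', b', ⟨⟨em, nm, hmem, heq2⟩, hin⟩, rfl⟩
    obtain ⟨rfl, rfl⟩ := Prod.mk.inj heq
    obtain ⟨rfl, rfl⟩ := Prod.mk.inj heq2
    refine ⟨em, nm, ⟨hmem, (pvCrux forms nm).mp ⟨g', ?_, hin⟩⟩, rfl⟩
    exact_mod_cast hb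
  · rintro ⟨a, b, ⟨hmem, hany⟩, rfl⟩
    obtain ⟨g, hcnt, hin⟩ := (pvCrux forms b).mpr hany
    refine ⟨g, ⟨g, (List.count g (pvOcc forms) : Int),
      ⟨⟨g, List.count_pos_iff.mp (by omega), rfl⟩, by exact_mod_cast hcnt⟩, rfl⟩,
      b, a, ⟨⟨a, b, hmem, rfl⟩, hin⟩, rfl⟩
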